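-- pv_equiv track=rewrite | github.com/Jayvee1413/AOC2020 | aoc2020/day6/main.py | aoc2020_6_b
-- ===== SOURCE A (Python) =====
-- def aoc2020_6_b(input: list):
--     count = 0
--     for data in input:
--         if data != "":
--             persons_answers = data.split("\n")
--             group_set = set()
--             started = 0
--             for answers in persons_answers:
--                 if not started:
--                     for answer in answers:
--                         group_set.add(answer)
--                     started = 1
--                 else:
--                     group_set = group_set.intersection(set(list(answers)))
--
--             count += len(group_set)
--     return count
-- ===== SOURCE B (Python) =====
-- def aoc2020_6_b(input: list):
--     count = 0
--     for data in input:
--         if data == "":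
--             continue
--         first, *rest = data.split("\n")
--         count += sum(1 for c in dict.fromkeys(first)
--                      if all(c in p for p in rest))
--     return count
-- ===== Notes on version B (the rewrite author's own statement) =====
-- stated objective: idiomatic
-- what changed: Replaces the running set-intersection with stateful started flag by a per-group comprehension: take the first person's distinct letters and count those contained in every remaining person's answers, so no intermediate sets are built.
import Mathlib
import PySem

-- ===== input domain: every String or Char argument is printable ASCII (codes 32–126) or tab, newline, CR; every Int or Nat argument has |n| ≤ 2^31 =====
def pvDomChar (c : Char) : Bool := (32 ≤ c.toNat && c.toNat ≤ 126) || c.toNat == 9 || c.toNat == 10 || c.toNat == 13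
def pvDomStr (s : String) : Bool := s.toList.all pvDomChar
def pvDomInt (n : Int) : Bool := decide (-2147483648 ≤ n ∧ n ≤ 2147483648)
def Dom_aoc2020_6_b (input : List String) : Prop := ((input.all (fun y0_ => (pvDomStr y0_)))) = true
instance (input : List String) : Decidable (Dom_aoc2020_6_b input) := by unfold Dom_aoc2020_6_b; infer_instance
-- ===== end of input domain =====

-- B replaces A's running set-intersection (with a started flag) by counting the first
-- person's distinct letters that occur in every other person's answers (idiomatic, not faster).


-- ===== PORT A =====
def aoc2020_6_b (input : List String) : Int :=
  input.foldl (fun count data =>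
    if data ≠ "" then
      let persons : List (List Char) := PySem.Chars.splitOn data.toList ['\n']
      let r := persons.foldl (fun (st : PySem.Set Char × Int) answers =>
        if st.2 = 0 then
          (answers.foldl PySem.Set.add st.1, 1)
        else
          (PySem.Set.inter st.1 (PySem.Set.ofList answers), st.2))
        (PySem.Set.empty, 0)
      count + PySem.Set.len r.1
    else count) 0

-- ===== PORT B =====
def aoc2020_6_b_alt (input : List String) : Int :=
  input.foldl (fun count data =>
    if data = "" then count
    else
      match PySem.Chars.splitOn data.toList ['\n'] with
      | [] => count
      | first :: rest =>
        count + (((PySem.List.dedup first).filter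
            (fun c => rest.all (fun p => p.contains c))).length : Int)) 0

-- ===== PRECONDITION & SPEC =====
def Spec_aoc2020_6_b (input : List String) (out : Int) : Prop := out = aoc2020_6_b_alt input
instance (input : List String) (out : Int) : Decidable (Spec_aoc2020_6_b input out) := by unfold Spec_aoc2020_6_b; infer_instance

-- ===== CLAIM (what is proved, stated in full; the proofs are below) =====
def Claim_equal_aoc2020_6_b : Prop := ∀ (input : List String), Dom_aoc2020_6_b input → Spec_aoc2020_6_b input (aoc2020_6_b input)

-- ===== LEMMAS AND PROOFS =====

theorem foldl_inter_eq_filter (rest : List (List Char)) (g : PySem.Set Char) :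
    rest.foldl (fun gs p => PySem.Set.inter gs (PySem.Set.ofList p)) g
      = g.filter (fun c => rest.all (fun p => p.contains c)) := by
  induction rest generalizing g with
  | nil => simp
  | cons p rest ih =>
    rw [List.foldl_cons, ih]
    simp only [PySem.Set.inter, List.filter_filter, List.all_cons]
    refine List.filter_congr ?_
    intro x _
    simp [Bool.and_comm]

theorem foldl_started (rest : List (List Char)) (g : PySem.Set Char) :
    rest.foldl (fun (st : PySem.Set Char × Int) answers =>
      if st.2 = 0 then
        (answers.foldl PySem.Set.add st.1, 1)
      else
        (PySem.Set.inter st.1 (PySem.Set.ofList answers), st.2)) (g, 1)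
    = (rest.foldl (fun gs p => PySem.Set.inter gs (PySem.Set.ofList p)) g, 1) := by
  induction rest generalizing g with
  | nil => rfl
  | cons p rest ih => simp [ih]

-- ===== VERDICT (by name: the statement is the Claim_ definition above) =====
theorem aoc2020_6_b_spec : Claim_equal_aoc2020_6_b := by
  intro input _
  unfold Spec_aoc2020_6_b aoc2020_6_b aoc2020_6_b_alt
  congr 1
  funext count data
  by_cases h : data = ""
  · simp [h]
  · simp only [h, ne_eq, not_false_iff, if_true]
    cases hp : PySem.Chars.splitOn data.toList ['\n'] with
    | nil => simp [PySem.Set.len, PySem.Set.empty]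
    | cons first rest =>
      simp only [List.foldl_cons, reduceIte]
      rw [foldl_started, foldl_inter_eq_filter]
      simp [PySem.Set.len, PySem.List.dedup_eq_ofList, PySem.Set.ofList_eq_foldl, PySem.Set.empty]
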